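-- pv_equiv track=rewrite | github.com/bruceyu777/autolib_refactor | lib/core/device/session/dev_conn.py | _has_repetitive_unit_run
-- ===== SOURCE A (Python) =====
-- def _has_repetitive_unit_run(text, threshold, max_unit):
--     """Check if the tail consists of consecutive repeats of a short unit.
--     Compares unit-length slices walking backwards from the end.
--     """
--     n = len(text)
--     if n == 0:
--         return False
--     for unit_len in range(max_unit, 0, -1):
--         if unit_len * threshold > n:
--             # Not enough room for the required repeats
--             continue
--         unit = text[-unit_len:]
--         repeats = 1
--         idx = n - 2 * unit_len
--         while idx >= 0 and text[idx : idx + unit_len] == unit: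
--             repeats += 1
--             if repeats >= threshold:
--                 return True
--             idx -= unit_len
--     return False
-- ===== SOURCE B (Python) =====
-- def _has_repetitive_unit_run(text, threshold, max_unit):
--     """Check if the tail consists of consecutive repeats of a short unit.
--     Closed-form: the tail of length unit_len*r must equal the unit repeated r times,
--     where r = max(threshold, 2) (A only returns True after at least 2 repeats).
--     """
--     n = len(text)
--     r = threshold if threshold > 2 else 2
--     for unit_len in range(max_unit, 0, -1):
--         if unit_len * r <= n and text[n - unit_len * r:] == text[n - unit_len:] * r:
--             return True
--     return False
-- ===== Notes on version B (the rewrite author's own statement) =====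
-- stated objective: simpler
-- what changed: Replaced A's inner backward-walking block-by-block repeat counter with a single closed-form comparison per unit length: the tail of length unit_len*max(threshold,2) must equal the trailing unit repeated that many times.
import Mathlib
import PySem

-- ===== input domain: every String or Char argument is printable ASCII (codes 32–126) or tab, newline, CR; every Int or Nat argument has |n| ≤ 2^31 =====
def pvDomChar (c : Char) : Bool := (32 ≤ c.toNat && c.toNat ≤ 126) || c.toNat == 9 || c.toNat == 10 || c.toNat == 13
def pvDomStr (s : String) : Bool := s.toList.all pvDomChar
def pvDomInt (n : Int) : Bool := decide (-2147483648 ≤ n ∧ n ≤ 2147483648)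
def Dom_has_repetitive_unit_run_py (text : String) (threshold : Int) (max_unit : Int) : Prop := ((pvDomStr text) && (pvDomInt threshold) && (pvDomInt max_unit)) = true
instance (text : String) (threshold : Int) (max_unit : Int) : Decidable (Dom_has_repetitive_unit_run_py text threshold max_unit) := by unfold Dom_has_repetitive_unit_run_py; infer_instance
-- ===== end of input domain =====

-- B replaces A's backward repeat-counting while-loop by one closed-form tail comparison per
-- unit length (tail of length unit_len*max(threshold,2) equals the unit repeated); objective: simpler.

-- ===== PORT A =====
-- the inner `while idx >= 0 and text[idx:idx+unit_len] == unit` loop of A; the fuel argument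
-- only makes the recursion total (text.length + 1 provably suffices wherever A runs it)
def pvWhileA (text unit : List Char) (unitLen threshold repeats idx : Int) : Nat → Bool
  | 0 => false
  | fuel + 1 =>
    if 0 ≤ idx ∧ PySem.List.slice text (some idx) (some (idx + unitLen)) = unit then
      if threshold ≤ repeats + 1 then true
      else pvWhileA text unit unitLen threshold (repeats + 1) (idx - unitLen) fuel
    else false

-- the `for unit_len in range(max_unit, 0, -1)` loop of A
def pvForA (text : List Char) (threshold n : Int) : List Int → Bool
  | [] => false
  | u :: rest =>
    if u * threshold > n then pvForA text threshold n rest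
    else
      let unit := PySem.List.slice text (some (-u)) none
      if pvWhileA text unit u threshold 1 (n - 2 * u) (text.length + 1) then true
      else pvForA text threshold n rest

def has_repetitive_unit_run_py (text : String) (threshold : Int) (max_unit : Int) : Bool :=
  let l := text.toList
  let n : Int := l.length
  if n = 0 then false
  else pvForA l threshold n (PySem.List.pyRange max_unit 0 (-1))

-- ===== PORT B =====
-- B's loop: one closed-form test per unit length (text[n-u*r:] == text[n-u:] * r)
def pvForB (text : List Char) (r n : Int) : List Int → Bool
  | [] => false
  | u :: rest =>
    if u * r ≤ n ∧
       PySem.List.slice text (some (n - u * r)) none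
         = PySem.List.pyRepeat (PySem.List.slice text (some (n - u)) none) r then true
    else pvForB text r n rest

def has_repetitive_unit_run_py_alt (text : String) (threshold : Int) (max_unit : Int) : Bool :=
  let l := text.toList
  let n : Int := l.length
  let r : Int := if threshold > 2 then threshold else 2
  pvForB l r n (PySem.List.pyRange max_unit 0 (-1))

-- ===== PRECONDITION & SPEC =====
def Spec_has_repetitive_unit_run_py (text : String) (threshold : Int) (max_unit : Int) (out : Bool) : Prop := out = has_repetitive_unit_run_py_alt text threshold max_unit
instance (text : String) (threshold : Int) (max_unit : Int) (out : Bool) : Decidable (Spec_has_repetitive_unit_run_py text threshold max_unit out) := by unfold Spec_has_repetitive_unit_run_py; infer_instance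

-- ===== CLAIM (what is proved, stated in full; the proofs are below) =====
def Claim_equal_has_repetitive_unit_run_py : Prop := ∀ (text : String) (threshold : Int) (max_unit : Int), Dom_has_repetitive_unit_run_py text threshold max_unit → Spec_has_repetitive_unit_run_py text threshold max_unit (has_repetitive_unit_run_py text threshold max_unit)

-- ===== LEMMAS AND PROOFS =====

-- "the k blocks of length u walking back from idx all stay in range and equal unit"
def pvBlocksOK (l unit : List Char) (u idx : Int) (k : Nat) : Prop :=
  ∀ j : Nat, j < k →
    0 ≤ idx - j * u ∧
    PySem.List.slice l (some (idx - j * u)) (some (idx - j * u + u)) = unit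

theorem pvBlocksOK_succ (l unit : List Char) (u idx : Int) (k : Nat) :
    pvBlocksOK l unit u idx (k + 1) ↔
      ((0 ≤ idx ∧ PySem.List.slice l (some idx) (some (idx + u)) = unit) ∧
        pvBlocksOK l unit u (idx - u) k) := by
  constructor
  · intro h
    refine ⟨?_, ?_⟩
    · have h0 := h 0 (by omega)
      simpa using h0
    · intro j hj
      have hj1 := h (j + 1) (by omega)
      have e : idx - (↑(j + 1)) * u = idx - u - (j : Int) * u := by push_cast; ring
      rw [e] at hj1
      exact hj1
  · rintro ⟨⟨h0, hs⟩, hrest⟩ j hj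
    cases j with
    | zero => simpa using ⟨h0, hs⟩
    | succ j =>
      have hj1 := hrest j (by omega)
      have e : idx - (↑(j + 1)) * u = idx - u - (j : Int) * u := by push_cast; ring
      rw [e]
      exact hj1

-- characterization of A's inner while loop as a block condition
theorem pvWhileA_char (l unit : List Char) (u th : Int)
    (k : Nat) : ∀ (m idx : Int) (fuel : Nat), 1 ≤ u →
    (k : Int) = max (th - m) 1 → k ≤ fuel →
    (pvWhileA l unit u th m idx fuel = true ↔ pvBlocksOK l unit u idx k) := by
  induction k with
  | zero => intro m idx fuel _ hk _; exfalso; omega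
  | succ k ih =>
    intro m idx fuel hu hk hf
    obtain ⟨f, rfl⟩ : ∃ f, fuel = f + 1 := ⟨fuel - 1, by omega⟩
    rw [pvWhileA]
    by_cases c0 : 0 ≤ idx ∧ PySem.List.slice l (some idx) (some (idx + u)) = unit
    · rw [if_pos c0]
      by_cases cth : th ≤ m + 1
      · rw [if_pos cth]
        have hk1 : k = 0 := by omega
        subst hk1
        simp only [true_iff]
        rw [pvBlocksOK_succ]
        exact ⟨c0, fun j hj => by omega⟩
      · rw [if_neg cth]
        have hk' : (k : Int) = max (th - (m + 1)) 1 := by omega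
        rw [ih (m + 1) (idx - u) f hu hk' (by omega), pvBlocksOK_succ]
        exact ⟨fun h => ⟨c0, h⟩, fun h => h.2⟩
    · rw [if_neg c0]
      refine ⟨fun h => absurd h (by simp), fun h => absurd (by simpa using h 0 (by omega)) c0⟩

-- block decomposition of the repeated tail
theorem pvRepTail (l : List Char) (uN : Nat) (hu : 1 ≤ uN) :
    ∀ (k : Nat), 1 ≤ k → uN * k ≤ l.length →
    (l.drop (l.length - uN * k) = (List.replicate k (l.drop (l.length - uN))).flatten ↔
      ∀ j : Nat, j < k - 1 →
        (l.drop (l.length - uN * (j + 2))).take uN = l.drop (l.length - uN)) := by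
  intro k
  induction k with
  | zero => intro h1 _; exact absurd h1 (by omega)
  | succ k ih =>
    intro _ hk1
    by_cases hk0 : k = 0
    · subst hk0
      simp
    · have hk : 1 ≤ k := by omega
      have em : uN * (k + 1) = uN * k + uN := by ring
      have em2 : k - 1 + 2 = k + 1 := by omega
      have hkle : uN * k ≤ l.length := by omega
      set n := l.length with hn
      have hule : uN ≤ n := by omega
      have harg : (n - uN * (k + 1)) + uN = n - uN * k := by omega
      have hdec : l.drop (n - uN * (k + 1)) =
          (l.drop (n - uN * (k + 1))).take uN ++ l.drop (n - uN * k) := by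
        conv_lhs => rw [← List.take_append_drop uN (l.drop (n - uN * (k + 1)))]
        rw [List.drop_drop, harg]
      have hlen1 : ((l.drop (n - uN * (k + 1))).take uN).length = uN := by
        rw [List.length_take, List.length_drop]
        omega
      have hlen2 : (l.drop (n - uN)).length = uN := by
        rw [List.length_drop]
        omega
      have hrep : (List.replicate (k + 1) (l.drop (n - uN))).flatten =
          l.drop (n - uN) ++ (List.replicate k (l.drop (n - uN))).flatten := by
        simp [List.replicate_succ]
      rw [hdec, hrep]
      constructor
      · intro h
        obtain ⟨h1, h2⟩ := List.append_inj h (by rw [hlen1, hlen2])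
        intro j hj
        by_cases hjk : j = k - 1
        · subst hjk
          rw [em2]
          exact h1
        · exact ((ih hk hkle).mp h2) j (by omega)
      · intro h
        have h1 : (l.drop (n - uN * (k + 1))).take uN = l.drop (n - uN) := by
          have h' := h (k - 1) (by omega)
          rwa [em2] at h'
        have h2 : l.drop (n - uN * k) = (List.replicate k (l.drop (n - uN))).flatten :=
          (ih hk hkle).mpr (fun j hj => h j (by omega))
        rw [h1, h2]

-- per-unit equality of A's loop body and B's closed-form test
theorem pvUnit_eq (l : List Char) (th u : Int) (hu : 1 ≤ u)
    (hn : 1 ≤ (l.length : Int)) :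
    (if u * th > (l.length : Int) then false
     else if pvWhileA l (PySem.List.slice l (some (-u)) none) u th 1
              ((l.length : Int) - 2 * u) (l.length + 1) then true else false)
    = (decide (u * (if th > 2 then th else 2) ≤ (l.length : Int) ∧
        PySem.List.slice l (some ((l.length : Int) - u * (if th > 2 then th else 2))) none
          = PySem.List.pyRepeat (PySem.List.slice l (some ((l.length : Int) - u)) none)
              (if th > 2 then th else 2))) := by
  set r : Int := if th > 2 then th else 2 with hrdef
  have hr_eq : r = max th 2 := by rw [hrdef]; split_ifs <;> omega
  have hr2 : 2 ≤ r := by omega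
  have hthr : th ≤ r := by omega
  set uN : Nat := u.toNat with huN
  have hcu : (uN : Int) = u := by omega
  have huN1 : 1 ≤ uN := by omega
  set unit : List Char := l.drop (l.length - uN) with hunit
  have hunitA : PySem.List.slice l (some (-u)) none = unit := by
    rw [show (-u) = -((uN : Nat) : Int) by omega]
    exact PySem.List.slice_from_neg_natCast l uN (by omega)
  rw [hunitA]
  by_cases hcase : u * r ≤ (l.length : Int)
  · -- enough room: both sides reduce to the same block condition
    set rN : Nat := r.toNat with hrN
    have hcr : (rN : Int) = r := by omega
    have hrN2 : 2 ≤ rN := by omega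
    have hmul : ((uN * rN : Nat) : Int) = u * r := by push_cast; rw [hcu, hcr]
    have hur : uN * rN ≤ l.length := by omega
    have hule : uN ≤ l.length := by nlinarith
    have hrle : rN ≤ l.length := by nlinarith
    have hguard : ¬(u * th > (l.length : Int)) :=
      not_lt.mpr (le_trans (by nlinarith) hcase)
    rw [if_neg hguard]
    have hunitB : PySem.List.slice l (some ((l.length : Int) - u)) none = unit := by
      rw [PySem.List.slice_from l (by omega)]
      congr 1
      omega
    have htail : PySem.List.slice l (some ((l.length : Int) - u * r)) none
        = l.drop (l.length - uN * rN) := by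
      rw [PySem.List.slice_from l (by omega)]
      congr 1
      omega
    have hrep : PySem.List.pyRepeat unit r = (List.replicate rN unit).flatten := by
      simp [PySem.List.pyRepeat, hrN]
    have key : ∀ j : Nat, j < rN - 1 →
        ((0 ≤ (l.length : Int) - 2 * u - j * u ∧
          PySem.List.slice l (some ((l.length : Int) - 2 * u - j * u))
            (some ((l.length : Int) - 2 * u - j * u + u)) = unit) ↔
         (l.drop (l.length - uN * (j + 2))).take uN = unit) := by
      intro j hj
      have hj2 : j + 2 ≤ rN := by omega
      have hple : uN * (j + 2) ≤ uN * rN := Nat.mul_le_mul_left uN hj2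
      have hcast : ((uN * (j + 2) : Nat) : Int) = u * ((j : Int) + 2) := by
        push_cast; rw [hcu]
      have hdist : u * ((j : Int) + 2) = (j : Int) * u + 2 * u := by ring
      have hple2 : uN * (j + 2) ≤ l.length := le_trans hple hur
      have h1 : ((uN * (j + 2) : Nat) : Int) ≤ ((uN * rN : Nat) : Int) := by
        exact_mod_cast hple
      have h0 : 0 ≤ (l.length : Int) - 2 * u - j * u := by omega
      have hs : PySem.List.slice l (some ((l.length : Int) - 2 * u - j * u))
          (some ((l.length : Int) - 2 * u - j * u + u))
          = (l.drop (l.length - uN * (j + 2))).take uN := by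
        rw [PySem.List.slice_toNat l h0 (by omega)]
        rw [show ((l.length : Int) - 2 * u - j * u + u).toNat
              - ((l.length : Int) - 2 * u - j * u).toNat = uN by omega]
        rw [show ((l.length : Int) - 2 * u - j * u).toNat
              = l.length - uN * (j + 2) by omega]
      exact ⟨fun h => by rw [← hs]; exact h.2, fun h => ⟨h0, by rw [hs]; exact h⟩⟩
    have hblocks : pvBlocksOK l unit u ((l.length : Int) - 2 * u) (rN - 1) ↔
        ∀ j : Nat, j < rN - 1 → (l.drop (l.length - uN * (j + 2))).take uN = unit := by
      unfold pvBlocksOK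
      exact ⟨fun h j hj => (key j hj).mp (h j hj), fun h j hj => (key j hj).mpr (h j hj)⟩
    have hwhile := pvWhileA_char l unit u th (rN - 1) 1 ((l.length : Int) - 2 * u)
      (l.length + 1) hu (by omega) (by omega)
    have hrt := pvRepTail l uN huN1 rN (by omega) hur
    rw [htail, hunitB, hrep]
    have hiff : (pvWhileA l unit u th 1 ((l.length : Int) - 2 * u) (l.length + 1) = true)
        ↔ (decide (u * r ≤ (l.length : Int) ∧
            l.drop (l.length - uN * rN) = (List.replicate rN unit).flatten) = true) := by
      rw [decide_eq_true_iff, hwhile, hblocks, hunit]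
      exact ⟨fun h => ⟨hcase, hrt.mpr h⟩, fun h => hrt.mp h.2⟩
    have hif : (if pvWhileA l unit u th 1 ((l.length : Int) - 2 * u) (l.length + 1) = true
        then true else false)
        = pvWhileA l unit u th 1 ((l.length : Int) - 2 * u) (l.length + 1) := by
      cases pvWhileA l unit u th 1 ((l.length : Int) - 2 * u) (l.length + 1) <;> simp
    rw [hif]
    cases hB : decide (u * r ≤ (l.length : Int) ∧
        l.drop (l.length - uN * rN) = (List.replicate rN unit).flatten) with
    | false =>
      cases hA : pvWhileA l unit u th 1 ((l.length : Int) - 2 * u) (l.length + 1) with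
      | false => rfl
      | true => exact absurd (hiff.mp hA) (by rw [hB]; exact Bool.false_ne_true)
    | true => exact hiff.mpr hB
  · -- not enough room: both sides are false
    have hRHS : decide (u * r ≤ (l.length : Int) ∧
        PySem.List.slice l (some ((l.length : Int) - u * r)) none
          = PySem.List.pyRepeat (PySem.List.slice l (some ((l.length : Int) - u)) none) r)
        = false := by
      rw [decide_eq_false_iff_not]
      rintro ⟨h, -⟩
      exact hcase h
    rw [hRHS]
    by_cases hguard : u * th > (l.length : Int)
    · rw [if_pos hguard]
    · rw [if_neg hguard]
      have hth2 : th ≤ 2 := by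
        by_contra hgt
        have hgt' : th > 2 := by omega
        rw [hrdef, if_pos hgt'] at hcase
        omega
      have hr2' : r = 2 := by omega
      have hidx : (l.length : Int) - 2 * u < 0 := by
        rw [hr2'] at hcase
        omega
      have hWf : pvWhileA l unit u th 1 ((l.length : Int) - 2 * u) (l.length + 1) = false := by
        rw [pvWhileA]
        rw [if_neg]
        rintro ⟨h0, -⟩
        omega
      rw [hWf]
      simp

-- the two loops agree over any list of positive unit lengths (nonempty text)
theorem pvFor_eq (l : List Char) (th : Int) (hn : 1 ≤ (l.length : Int)) :
    ∀ units : List Int, (∀ u ∈ units, 0 < u) →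
    pvForA l th (l.length : Int) units
      = pvForB l (if th > 2 then th else 2) (l.length : Int) units := by
  intro units hpos
  induction units with
  | nil => rfl
  | cons u rest ih =>
    have hu : 1 ≤ u := hpos u (by simp)
    have ih' := ih (fun v hv => hpos v (by simp [hv]))
    have hE := pvUnit_eq l th u hu hn
    simp only [pvForA, pvForB]
    by_cases hg : u * th > (l.length : Int)
    · rw [if_pos hg]
      rw [if_pos hg] at hE
      rw [if_neg (of_decide_eq_false hE.symm)]
      exact ih'
    · rw [if_neg hg] at hE ⊢
      cases hW : pvWhileA l (PySem.List.slice l (some (-u)) none) u th 1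
          ((l.length : Int) - 2 * u) (l.length + 1) with
      | true =>
        rw [hW] at hE
        rw [if_pos (of_decide_eq_true hE.symm)]
        simp
      | false =>
        rw [hW] at hE
        simp only [Bool.false_eq_true, if_false] at hE ⊢
        rw [if_neg (of_decide_eq_false hE.symm)]
        exact ih'

-- B's loop returns false on the empty text
theorem pvForB_zero (l : List Char) (r : Int) (hr : 2 ≤ r) (hn : (l.length : Int) = 0) :
    ∀ units : List Int, (∀ u ∈ units, 0 < u) → pvForB l r (l.length : Int) units = false := by
  intro units hpos
  induction units with
  | nil => rfl
  | cons u rest ih =>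
    have hu : 0 < u := hpos u (by simp)
    simp only [pvForB]
    rw [if_neg]
    · exact ih (fun v hv => hpos v (by simp [hv]))
    · rintro ⟨h1, -⟩
      nlinarith

-- ===== VERDICT (by name: the statement is the Claim_ definition above) =====
theorem has_repetitive_unit_run_py_spec : Claim_equal_has_repetitive_unit_run_py := by
  intro text th mu _
  unfold Spec_has_repetitive_unit_run_py has_repetitive_unit_run_py has_repetitive_unit_run_py_alt
  have hpos : ∀ u ∈ PySem.List.pyRange mu 0 (-1), 0 < u := by
    intro u hu
    exact (PySem.List.mem_pyRange_neg_one.mp hu).1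
  have hr2 : 2 ≤ (if th > 2 then th else 2) := by split_ifs <;> omega
  by_cases hn0 : ((text.toList.length : Int)) = 0
  · rw [if_pos hn0]
    exact (pvForB_zero text.toList _ hr2 hn0 _ hpos).symm
  · simp only [if_neg hn0]
    exact pvFor_eq text.toList th (by omega) _ hpos
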